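-- pv_equiv track=rewrite | github.com/The-devop/Cipher-Labs | crypto_core.py | catalan_cipher
-- ===== SOURCE A (Python) =====
-- A_ORD = ord("A")
--
-- def _clean(text: str) -> str:
--     """Convert text to uppercase"""
--     return text.upper()
--
-- def _char_to_num(c: str) -> int:
--     """Convert letter to 0-25"""
--     return ord(c) - A_ORD
--
-- def _num_to_char(n: int) -> str:
--     """Convert 0-25 to letter (wraps around)"""
--     return chr(((n % 26) + 26) % 26 + A_ORD)
--
-- def catalan_cipher(text: str) -> str:
--     """Catalan numbers cipher"""
--     def catalan_number(n):
--         if n <= 1: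
--             return 1
--         result = 0
--         for i in range(n):
--             result += catalan_number(i) * catalan_number(n - 1 - i)
--         return result
--
--     catalan = [catalan_number(i) for i in range(10)]
--     text = _clean(text)
--     result = []
--     for i, ch in enumerate(text):
--         shift = catalan[(_char_to_num(ch) + i) % len(catalan)] % 26
--         result.append(_num_to_char((_char_to_num(ch) + shift) % 26))
--     return "".join(result)
-- ===== SOURCE B (Python) =====
-- def catalan_cipher(text: str) -> str:
--     """Catalan numbers cipher (iterative Catalan table, precomputed shifts)."""
--     catalan = [1]
--     for n in range(9):
--         catalan.append(catalan[-1] * 2 * (2 * n + 1) // (n + 2))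
--     shifts = [c % 26 for c in catalan]
--     return "".join(
--         chr((ord(ch) - 65 + shifts[(ord(ch) - 65 + i) % 10]) % 26 + 65)
--         for i, ch in enumerate(text.upper())
--     )
-- ===== Notes on version B (the rewrite author's own statement) =====
-- stated objective: faster
-- what changed: B replaces the exponential naive-recursive Catalan computation with an iterative multiplicative recurrence C(n+1)=C(n)*2*(2n+1)//(n+2), precomputes the shift table (Catalan mod 26) once, and emits the output as a single join over a comprehension with the character formula inlined instead of appending per-character helper-call results to a list.
import Mathlib
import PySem

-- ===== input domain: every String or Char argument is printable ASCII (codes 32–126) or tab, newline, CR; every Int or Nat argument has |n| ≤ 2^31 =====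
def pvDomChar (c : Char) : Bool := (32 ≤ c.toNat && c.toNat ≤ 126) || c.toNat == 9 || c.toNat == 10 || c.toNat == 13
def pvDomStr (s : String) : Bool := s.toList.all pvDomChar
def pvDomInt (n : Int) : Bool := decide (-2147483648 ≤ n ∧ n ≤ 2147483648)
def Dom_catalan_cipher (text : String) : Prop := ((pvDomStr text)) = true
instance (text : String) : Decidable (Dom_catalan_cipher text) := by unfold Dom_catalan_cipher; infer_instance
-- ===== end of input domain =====

-- B computes the Catalan table iteratively by the multiplicative recurrence and precomputes
-- the shift table (Catalan mod 26) once, instead of A's exponential naive recursion; the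
-- cipher output is built by mapping an inlined formula instead of appending helper results.

-- ===== PORT A =====
-- naive recursive catalan_number(n): exponential double recursion over range(n)
def catNumA (n : Nat) : Nat :=
  if n ≤ 1 then 1
  else (List.range n).attach.foldl
    (fun acc i => acc + catNumA i.1 * catNumA (n - 1 - i.1)) 0
decreasing_by
  all_goals (have := List.mem_range.mp i.2; omega)

def catalan_cipher (text : String) : String :=
  -- catalan = [catalan_number(i) for i in range(10)]
  let catalan : List Int := (List.range 10).map (fun i => ((catNumA i : Nat) : Int))
  -- text = _clean(text)  (upper-case)
  let t : List Char := PySem.Chars.upper text.toList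
  -- the main loop; the index (…) % 10 is always in range, so pyGetD with default 0 is exact
  let result : List Char := (PySem.List.enumerate t).foldl
    (fun acc p =>
      let cn : Int := (p.2.toNat : Int) - 65       -- _char_to_num(ch)
      let shift : Int := PySem.Int.mod (PySem.List.pyGetD catalan (PySem.Int.mod (cn + p.1) 10) 0) 26
      -- _num_to_char((cn + shift) % 26) = chr(((n % 26) + 26) % 26 + 65)
      acc ++ [Char.ofNat (PySem.Int.mod (PySem.Int.mod (PySem.Int.mod (cn + shift) 26) 26 + 26) 26 + 65).toNat])
    []
  String.ofList result

-- ===== PORT B =====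
def catalan_cipher_alt (text : String) : String :=
  -- catalan built iteratively: catalan.append(catalan[-1] * 2 * (2*n+1) // (n+2))
  let catalan : List Int := (List.range 9).foldl
    (fun cs n => cs ++ [PySem.Int.floordiv (PySem.List.pyGetD cs (-1) 0 * 2 * (2 * (n : Int) + 1)) ((n : Int) + 2)])
    [1]
  let shifts : List Int := catalan.map (fun c => PySem.Int.mod c 26)
  String.ofList ((PySem.List.enumerate (PySem.Chars.upper text.toList)).map
    (fun p =>
      let k : Int := (p.2.toNat : Int) - 65
      Char.ofNat (PySem.Int.mod (k + PySem.List.pyGetD shifts (PySem.Int.mod (k + p.1) 10) 0) 26 + 65).toNat))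

-- ===== PRECONDITION & SPEC =====
def Spec_catalan_cipher (text : String) (out : String) : Prop := out = catalan_cipher_alt text
instance (text : String) (out : String) : Decidable (Spec_catalan_cipher text out) := by unfold Spec_catalan_cipher; infer_instance

-- ===== CLAIM (what is proved, stated in full; the proofs are below) =====
def Claim_equal_catalan_cipher : Prop := ∀ (text : String), Dom_catalan_cipher text → Spec_catalan_cipher text (catalan_cipher text)

-- ===== LEMMAS AND PROOFS =====
lemma catNumA_eq (n : Nat) :
    catNumA n = if n ≤ 1 then 1
      else (List.range n).foldl (fun acc i => acc + catNumA i * catNumA (n - 1 - i)) 0 := by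
  rw [catNumA]
  split_ifs with h
  · rfl
  · rw [List.foldl_attach (f := fun acc i => acc + catNumA i * catNumA (n - 1 - i))]

lemma catNumA_vals :
    catNumA 0 = 1 ∧ catNumA 1 = 1 ∧ catNumA 2 = 2 ∧ catNumA 3 = 5 ∧ catNumA 4 = 14 ∧
    catNumA 5 = 42 ∧ catNumA 6 = 132 ∧ catNumA 7 = 429 ∧ catNumA 8 = 1430 ∧ catNumA 9 = 4862 := by
  have c0 : catNumA 0 = 1 := by rw [catNumA_eq]; norm_num
  have c1 : catNumA 1 = 1 := by rw [catNumA_eq]; norm_num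
  have c2 : catNumA 2 = 2 := by rw [catNumA_eq]; norm_num [List.range_succ, c0, c1]
  have c3 : catNumA 3 = 5 := by rw [catNumA_eq]; norm_num [List.range_succ, c0, c1, c2]
  have c4 : catNumA 4 = 14 := by rw [catNumA_eq]; norm_num [List.range_succ, c0, c1, c2, c3]
  have c5 : catNumA 5 = 42 := by rw [catNumA_eq]; norm_num [List.range_succ, c0, c1, c2, c3, c4]
  have c6 : catNumA 6 = 132 := by rw [catNumA_eq]; norm_num [List.range_succ, c0, c1, c2, c3, c4, c5]
  have c7 : catNumA 7 = 429 := by rw [catNumA_eq]; norm_num [List.range_succ, c0, c1, c2, c3, c4, c5, c6]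
  have c8 : catNumA 8 = 1430 := by rw [catNumA_eq]; norm_num [List.range_succ, c0, c1, c2, c3, c4, c5, c6, c7]
  have c9 : catNumA 9 = 4862 := by rw [catNumA_eq]; norm_num [List.range_succ, c0, c1, c2, c3, c4, c5, c6, c7, c8]
  exact ⟨c0, c1, c2, c3, c4, c5, c6, c7, c8, c9⟩

lemma catA_list :
    (List.range 10).map (fun i => ((catNumA i : Nat) : Int))
      = [1, 1, 2, 5, 14, 42, 132, 429, 1430, 4862] := by
  obtain ⟨c0, c1, c2, c3, c4, c5, c6, c7, c8, c9⟩ := catNumA_vals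
  norm_num [List.range_succ, c0, c1, c2, c3, c4, c5, c6, c7, c8, c9]

lemma catB_list :
    (List.range 9).foldl
      (fun cs n => cs ++ [PySem.Int.floordiv (PySem.List.pyGetD cs (-1) 0 * 2 * (2 * (n : Int) + 1)) ((n : Int) + 2)])
      [1]
      = [1, 1, 2, 5, 14, 42, 132, 429, 1430, 4862] := by decide

lemma shifts_list :
    ([1, 1, 2, 5, 14, 42, 132, 429, 1430, 4862] : List Int).map (fun c => PySem.Int.mod c 26)
      = [1, 1, 2, 5, 14, 16, 2, 13, 0, 0] := by decide

lemma step (k a b : Int) (hab : PySem.Int.mod a 26 = b) :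
    Char.ofNat (PySem.Int.mod (PySem.Int.mod (PySem.Int.mod (k + PySem.Int.mod a 26) 26) 26 + 26) 26 + 65).toNat
      = Char.ofNat (PySem.Int.mod (k + b) 26 + 65).toNat := by
  rw [hab]
  simp only [PySem.Int.mod_eq_emod_of_pos (b := 26) (by norm_num)]
  congr 1
  omega

lemma point (p : Int × Char) :
    Char.ofNat (PySem.Int.mod (PySem.Int.mod (PySem.Int.mod (((p.2.toNat : Int) - 65) +
        PySem.Int.mod (PySem.List.pyGetD ([1, 1, 2, 5, 14, 42, 132, 429, 1430, 4862] : List Int)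
          (PySem.Int.mod (((p.2.toNat : Int) - 65) + p.1) 10) 0) 26) 26) 26 + 26) 26 + 65).toNat
      = Char.ofNat (PySem.Int.mod (((p.2.toNat : Int) - 65) +
        PySem.List.pyGetD ([1, 1, 2, 5, 14, 16, 2, 13, 0, 0] : List Int)
          (PySem.Int.mod (((p.2.toNat : Int) - 65) + p.1) 10) 0) 26 + 65).toNat := by
  have h0 : 0 ≤ PySem.Int.mod (((p.2.toNat : Int) - 65) + p.1) 10 :=
    PySem.Int.mod_nonneg _ (by norm_num)
  have h1 : PySem.Int.mod (((p.2.toNat : Int) - 65) + p.1) 10 < 10 :=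
    PySem.Int.mod_lt _ (by norm_num)
  set m := PySem.Int.mod (((p.2.toNat : Int) - 65) + p.1) 10 with hm
  clear_value m
  interval_cases m <;> exact step _ _ _ (by decide)

-- ===== VERDICT (by name: the statement is the Claim_ definition above) =====
theorem catalan_cipher_spec : Claim_equal_catalan_cipher := by
  intro text _
  unfold Spec_catalan_cipher
  simp only [catalan_cipher, catalan_cipher_alt]
  rw [catA_list, catB_list, shifts_list,
    PySem.List.foldl_append_singleton_eq_map]
  simp only [List.nil_append]
  congr 1
  exact List.map_congr_left (fun p _ => point p)
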